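-- pv_equiv track=rewrite | github.com/engoulet/PersonalProjects | goFish.py | collectCardsFromOpp
-- ===== SOURCE A (Python) =====
-- def compareCard(num, id):
-- 	if num == "A" and id % 13 == 1: return True
-- 	elif num == "J" and id % 13 == 11: return True
-- 	elif num == "Q" and id % 13 == 12: return True
-- 	elif num == "K" and id % 13 == 0: return True
-- 	elif num.isdigit() and int(num) == id % 13: return True
-- 	else: return False
--
-- def collectCardsFromOpp(hands, num, target, dest):
-- 	count = 0  #count how many card are found
--
-- 	#loop through the hand of the target player
-- 	i = 0
-- 	while i < len(hands[target]):
-- 		if compareCard(num, hands[target][i]):  #if the card matches the desired number, take it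
-- 			hands[dest].append(hands[target].pop(i))
-- 			count = count + 1
-- 		else:
-- 			i += 1
--
-- 	return count
-- ===== SOURCE B (Python) =====
-- # B: two-pass partition instead of A's in-place scan-with-pop loop.
-- # Same observable mutation of hands when target and dest denote different lists.
-- def compareCard(num, id):
--     if num == "A" and id % 13 == 1: return True
--     elif num == "J" and id % 13 == 11: return True
--     elif num == "Q" and id % 13 == 12: return True
--     elif num == "K" and id % 13 == 0: return True
--     elif num.isdigit() and int(num) == id % 13: return True
--     else: return False
--
-- def collectCardsFromOpp(hands, num, target, dest):
--     matched = [c for c in hands[target] if compareCard(num, c)]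
--     if matched:
--         hands[dest].extend(matched)
--         hands[target][:] = [c for c in hands[target] if not compareCard(num, c)]
--     return len(matched)
-- ===== Notes on version B (the rewrite author's own statement) =====
-- stated objective: simpler
-- what changed: A's single in-place while loop interleaving pop(i)/append per match is replaced by a two-pass partition: build the matched list once, then (if any) extend dest and slice-assign the survivors back, returning len(matched).
import Mathlib
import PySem

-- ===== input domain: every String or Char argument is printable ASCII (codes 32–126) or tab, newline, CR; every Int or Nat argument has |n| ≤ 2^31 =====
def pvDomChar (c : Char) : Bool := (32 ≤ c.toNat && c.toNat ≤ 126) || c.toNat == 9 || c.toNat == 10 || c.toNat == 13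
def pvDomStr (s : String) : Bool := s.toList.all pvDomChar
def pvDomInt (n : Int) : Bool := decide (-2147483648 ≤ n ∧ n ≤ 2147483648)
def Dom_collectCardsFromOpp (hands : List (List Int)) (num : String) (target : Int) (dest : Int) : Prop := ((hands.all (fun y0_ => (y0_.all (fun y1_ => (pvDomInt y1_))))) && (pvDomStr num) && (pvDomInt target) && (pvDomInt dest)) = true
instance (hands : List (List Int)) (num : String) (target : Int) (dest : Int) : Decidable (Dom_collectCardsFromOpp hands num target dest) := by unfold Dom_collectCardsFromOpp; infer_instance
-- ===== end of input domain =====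

-- Equivalence proved here is about the RETURN value only; both Pythons mutate `hands`
-- (identically when target and dest name different lists). B is a two-pass partition
-- instead of A's in-place pop loop.

-- ===== PORT A =====
-- shared same-module helper compareCard (used by both ports and by Pre_).
-- num.isdigit() guarantees int(num) parses, so the getD 0 default is never the value used.
def compareCard (num : String) (id : Int) : Bool :=
  if num == "A" && PySem.Int.mod id 13 == 1 then true
  else if num == "J" && PySem.Int.mod id 13 == 11 then true
  else if num == "Q" && PySem.Int.mod id 13 == 12 then true
  else if num == "K" && PySem.Int.mod id 13 == 0 then true
  else if PySem.Str.strIsdigit num && (PySem.Int.ofStr? num).getD 0 == PySem.Int.mod id 13 then true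
  else false

-- A's while loop over hands[target]: pop(i) on a match (count+1, i unchanged), else i+1.
-- (hands[dest].append only mutates; it does not affect the returned count.)
def collectLoopA (num : String) (lst : List Int) (i : Nat) (count : Int) : Int :=
  if h : i < lst.length then
    if compareCard num lst[i] then
      collectLoopA num (lst.eraseIdx i) i (count + 1)
    else
      collectLoopA num lst (i + 1) count
  else count
termination_by lst.length - i
decreasing_by
  · simp [List.length_eraseIdx, h]; omega
  · omega

def collectCardsFromOpp (hands : List (List Int)) (num : String) (target : Int) (dest : Int) : Int :=
  match PySem.List.pyGet? hands target with
  | some t => collectLoopA num t 0 0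
  | none => 0   -- Python raises IndexError here; excluded by Pre_

-- ===== PORT B =====
def collectCardsFromOpp_alt (hands : List (List Int)) (num : String) (target : Int) (dest : Int) : Int :=
  match PySem.List.pyGet? hands target with
  | some t =>
      let matched := t.filter (fun c => compareCard num c)
      if matched = [] then (0 : Int)   -- len(matched) = 0; dest never touched
      else
        match PySem.List.pyGet? hands dest with
        | some _ =>
            -- hands[dest].extend(matched); hands[target][:] = survivors  (mutations only)
            (matched.length : Int)
        | none => 0   -- Python raises IndexError here; excluded by Pre_
  | none => 0   -- Python raises IndexError here; excluded by Pre_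

-- ===== PRECONDITION & SPEC =====
-- Pre_ excludes exactly the inputs where A does not return: out-of-range target (IndexError),
-- and — when some card of hands[target] matches — out-of-range dest (IndexError) or target and
-- dest resolving to the same index (A's pop/append loop never terminates there).
def Pre_collectCardsFromOpp (hands : List (List Int)) (num : String) (target : Int) (dest : Int) : Prop :=
  PySem.Raise.InRange hands.length target ∧
  ((∀ c ∈ PySem.List.pyGetD hands target [], compareCard num c = false) ∨
   (PySem.Raise.InRange hands.length dest ∧
    (if target < 0 then target + hands.length else target) ≠ (if dest < 0 then dest + hands.length else dest)))
instance (hands : List (List Int)) (num : String) (target : Int) (dest : Int) : Decidable (Pre_collectCardsFromOpp hands num target dest) := by unfold Pre_collectCardsFromOpp; infer_instance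

def pvWitness_collectCardsFromOpp : List (List Int) × String × Int × Int := ([[1, 14, 2], [3]], "A", 0, 1)

def Spec_collectCardsFromOpp (hands : List (List Int)) (num : String) (target : Int) (dest : Int) (out : Int) : Prop := out = collectCardsFromOpp_alt hands num target dest
instance (hands : List (List Int)) (num : String) (target : Int) (dest : Int) (out : Int) : Decidable (Spec_collectCardsFromOpp hands num target dest out) := by unfold Spec_collectCardsFromOpp; infer_instance

-- ===== CLAIM (what is proved, stated in full; the proofs are below) =====
def Claim_equal_collectCardsFromOpp : Prop := ∀ (hands : List (List Int)) (num : String) (target : Int) (dest : Int), Dom_collectCardsFromOpp hands num target dest → Pre_collectCardsFromOpp hands num target dest → Spec_collectCardsFromOpp hands num target dest (collectCardsFromOpp hands num target dest)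

-- ===== LEMMAS AND PROOFS =====

theorem collectLoopA_spec (num : String) : ∀ (m : Nat) (lst : List Int) (i : Nat) (count : Int),
    lst.length - i ≤ m →
    collectLoopA num lst i count = count + (((lst.drop i).filter (fun c => compareCard num c)).length : Int) := by
  intro m
  induction m with
  | zero =>
    intro lst i count h
    have hi : ¬ i < lst.length := by omega
    rw [collectLoopA]
    simp [hi, List.drop_eq_nil_of_le (by omega : lst.length ≤ i)]
  | succ m ih =>
    intro lst i count h
    rw [collectLoopA]
    by_cases hi : i < lst.length
    · simp only [hi, dif_pos]
      have hdrop : lst.drop i = lst[i] :: lst.drop (i + 1) := List.drop_eq_getElem_cons hi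
      by_cases hc : compareCard num lst[i] = true
      · simp only [hc, if_pos]
        rw [ih (lst.eraseIdx i) i (count + 1) (by simp [List.length_eraseIdx, hi]; omega)]
        have herase : (lst.eraseIdx i).drop i = lst.drop (i + 1) := by
          rw [List.eraseIdx_eq_take_drop_succ]
          exact List.drop_left' (by simp; omega)
        have hlen : (List.filter (fun c => compareCard num c) (lst.drop i)).length
            = (List.filter (fun c => compareCard num c) (lst.drop (i + 1))).length + 1 := by
          rw [hdrop, List.filter_cons_of_pos hc]; simp
        rw [herase, hlen]
        push_cast; ring
      · simp only [hc, if_neg, Bool.not_eq_true]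
        rw [ih lst (i + 1) count (by omega), hdrop,
          List.filter_cons_of_neg (by simpa using hc)]
    · simp [hi, List.drop_eq_nil_of_le (by omega : lst.length ≤ i)]

-- ===== VERDICT (by name: the statement is the Claim_ definition above) =====
theorem collectCardsFromOpp_spec : Claim_equal_collectCardsFromOpp := by
  intro hands num target dest _hdom hpre
  obtain ⟨ht, hrest⟩ := hpre
  unfold Spec_collectCardsFromOpp collectCardsFromOpp collectCardsFromOpp_alt
  rcases hot : PySem.List.pyGet? hands target with _ | t
  · exact ((not_not_intro ht) ((PySem.List.pyGet?_eq_none_iff _ _).mp hot)).elim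
  have hloop : collectLoopA num t 0 0 = ((t.filter (fun c => compareCard num c)).length : Int) := by
    rw [collectLoopA_spec num t.length t 0 0 (by omega)]; simp
  simp only [hloop]
  rcases hrest with hnone | ⟨hd, _⟩
  · have htD : PySem.List.pyGetD hands target ([] : List Int) = t := by
      simp [PySem.List.pyGetD, hot]
    have hfil : t.filter (fun c => compareCard num c) = [] := by
      refine List.filter_eq_nil_iff.mpr (fun c hc => ?_)
      simp [hnone c (htD ▸ hc)]
    simp [hfil]
  · rcases hod : PySem.List.pyGet? hands dest with _ | d
    · exact ((not_not_intro hd) ((PySem.List.pyGet?_eq_none_iff _ _).mp hod)).elim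
    · split_ifs with hfil
      · simp [hfil]
      · rfl
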